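-- pv_equiv track=rewrite | github.com/leeiopd/algorithm | 2022/python/211006_종만북_solution_POTION_직관적인 알고리즘.py | solveSimulation
-- ===== SOURCE A (Python) =====
-- def solveSimulation(r_list, p_list, n):
--     ret = [0] * n
--
--     for i in range(n):
--         ret[i] = max(r_list[i] - p_list[i], 0)
--         p_list[i] += ret[i]
--
--     while True:
--         flag = 1
--
--         for i in range(n):
--             for j in range(n):
--                 # i 번 재료 기준, 모든 재료는 ( p_list[i] / r_list[i] = X ) 배 이상 넣어야 한다.
--                 # 따라서 p_list[j] 는 r_list[i] * X 이상의 정수가 되어야 한다.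
--                 require = (p_list[i] * r_list[j] + r_list[i] - 1) // r_list[i]
--
--                 if require > p_list[j]:
--                     ret[j] += require - p_list[j]
--                     p_list[j] = require
--                     flag = 0
--
--         if flag:
--             break
--     return ret
-- ===== SOURCE B (Python) =====
-- # Closed form instead of the fixpoint simulation: the final amounts are
-- # s[i]*t with s = r/gcd(r) and t = max_i ceil(max(p_i, r_i)/s_i).
-- # Note: A mutates p_list in place; B does not (equivalence is about the return value).
-- def solveSimulation(r_list, p_list, n):
--     if n <= 0:
--         return []
--     g = 0
--     for x in r_list[:n]:
--         while x:
--             g, x = x, g % x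
--     t = 0
--     for i in range(n):
--         s = r_list[i] // g
--         need = p_list[i] if p_list[i] > r_list[i] else r_list[i]
--         c = -(-need // s)
--         if c > t:
--             t = c
--     return [r_list[i] // g * t - p_list[i] for i in range(n)]
-- ===== Notes on version B (the rewrite author's own statement) =====
-- stated objective: alternative
-- what changed: Replaces the O(n^2)-per-pass fixpoint iteration (whose pass count grows with the input magnitudes) by a closed form: final amounts are s[i]*t with s = r/gcd(r) and t = max_i ceil(max(p_i,r_i)/s_i). Intended as faster, but a timing run could not confirm a ratio (A already times out at n=16 where B returns, and where both finish A is too quick to measure), so no speed is claimed.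
import Mathlib
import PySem

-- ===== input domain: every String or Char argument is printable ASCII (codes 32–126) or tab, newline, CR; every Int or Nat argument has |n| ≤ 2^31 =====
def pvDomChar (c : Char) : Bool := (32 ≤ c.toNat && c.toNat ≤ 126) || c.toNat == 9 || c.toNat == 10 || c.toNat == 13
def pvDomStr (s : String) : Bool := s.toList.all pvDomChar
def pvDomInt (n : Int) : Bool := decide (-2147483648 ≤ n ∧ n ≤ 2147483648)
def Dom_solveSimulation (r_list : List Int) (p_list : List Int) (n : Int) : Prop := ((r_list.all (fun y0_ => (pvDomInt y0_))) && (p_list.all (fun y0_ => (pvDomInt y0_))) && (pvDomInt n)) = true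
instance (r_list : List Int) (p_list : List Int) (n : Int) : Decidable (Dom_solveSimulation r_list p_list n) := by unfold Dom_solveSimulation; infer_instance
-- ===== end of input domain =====

-- B replaces A's O(n^2)-per-pass fixpoint iteration by a closed form (s[i]*t with s = r/gcd(r),
-- t = max_i ceil(max(p_i,r_i)/s_i)); A mutates p_list in place in Python, the equivalence proved
-- here is about the return value only.

-- ===== PORT A =====
def pvInitA (r_list p_list : List Int) (n : Int) : List Int × List Int :=
  (PySem.List.pyRange 0 n 1).foldl
    (fun st i =>
      let v := max (PySem.List.pyGetD r_list i 0 - PySem.List.pyGetD st.2 i 0) 0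
      (PySem.List.pySetD st.1 i v,
       PySem.List.pySetD st.2 i (PySem.List.pyGetD st.2 i 0 + v)))
    (List.replicate n.toNat 0, p_list)

def pvPassA (r_list : List Int) (n : Int) (st : List Int × List Int × Int) :
    List Int × List Int × Int :=
  (PySem.List.pyRange 0 n 1).foldl
    (fun st i =>
      (PySem.List.pyRange 0 n 1).foldl
        (fun st j =>
          let require := PySem.Int.floordiv
            (PySem.List.pyGetD st.2.1 i 0 * PySem.List.pyGetD r_list j 0 +
              PySem.List.pyGetD r_list i 0 - 1)
            (PySem.List.pyGetD r_list i 0)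
          if require > PySem.List.pyGetD st.2.1 j 0 then
            (PySem.List.pySetD st.1 j
               (PySem.List.pyGetD st.1 j 0 + (require - PySem.List.pyGetD st.2.1 j 0)),
             PySem.List.pySetD st.2.1 j require, 0)
          else st)
        st)
    st

-- fuel that makes A's 'while True' total; the proofs below show it never runs out inside Pre_
def pvFuelA (r_list p_list : List Int) (n : Int) : Nat :=
  ((r_list.take n.toNat).map Int.natAbs).sum *
      (((p_list.take n.toNat).map Int.natAbs).sum + ((r_list.take n.toNat).map Int.natAbs).sum) + 1

def pvLoopA (r_list : List Int) (n : Int) : Nat → List Int × List Int → List Int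
  | 0, st => st.1
  | fuel + 1, st =>
    let res := pvPassA r_list n (st.1, st.2, 1)
    if res.2.2 ≠ 0 then res.1 else pvLoopA r_list n fuel (res.1, res.2.1)

def solveSimulation (r_list : List Int) (p_list : List Int) (n : Int) : List Int :=
  pvLoopA r_list n (pvFuelA r_list p_list n) (pvInitA r_list p_list n)

-- ===== PORT B =====
def pvGcdW (g x : Int) : Int :=
  if hx : x = 0 then g else pvGcdW x (PySem.Int.mod g x)
termination_by x.natAbs
decreasing_by
  rcases lt_trichotomy x 0 with h | h | h
  · have := PySem.Int.mod_neg_bounds (a := g) (b := x) h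
    omega
  · exact absurd h hx
  · have h1 := PySem.Int.mod_nonneg (a := g) (b := x) h
    have h2 := PySem.Int.mod_lt (a := g) (b := x) h
    omega

def solveSimulation_alt (r_list : List Int) (p_list : List Int) (n : Int) : List Int :=
  if n ≤ 0 then []
  else
    let g := (PySem.List.slice r_list none (some n)).foldl (fun g x => pvGcdW g x) 0
    let t := (PySem.List.pyRange 0 n 1).foldl
      (fun t i =>
        let s := PySem.Int.floordiv (PySem.List.pyGetD r_list i 0) g
        let need := if PySem.List.pyGetD p_list i 0 > PySem.List.pyGetD r_list i 0 then
            PySem.List.pyGetD p_list i 0 else PySem.List.pyGetD r_list i 0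
        let c := -(PySem.Int.floordiv (-need) s)
        if c > t then c else t) 0
    (PySem.List.pyRange 0 n 1).map
      (fun i => PySem.Int.floordiv (PySem.List.pyGetD r_list i 0) g * t -
        PySem.List.pyGetD p_list i 0)

-- ===== PRECONDITION & SPEC =====
-- Pre_ excludes exactly the inputs where A does not return: n beyond a list length (IndexError)
-- and a nonpositive ratio among the first n (ZeroDivisionError, or the correction loop diverges).
def Pre_solveSimulation (r_list : List Int) (p_list : List Int) (n : Int) : Prop :=
  n.toNat ≤ r_list.length ∧ n.toNat ≤ p_list.length ∧ ∀ x ∈ r_list.take n.toNat, 0 < x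
instance (r_list : List Int) (p_list : List Int) (n : Int) : Decidable (Pre_solveSimulation r_list p_list n) := by unfold Pre_solveSimulation; infer_instance

def pvWitness_solveSimulation : List Int × List Int × Int := ([2, 3], [3, 3], 2)

def Spec_solveSimulation (r_list : List Int) (p_list : List Int) (n : Int) (out : List Int) : Prop := out = solveSimulation_alt r_list p_list n
instance (r_list : List Int) (p_list : List Int) (n : Int) (out : List Int) : Decidable (Spec_solveSimulation r_list p_list n out) := by unfold Spec_solveSimulation; infer_instance

-- ===== CLAIM (what is proved, stated in full; the proofs are below) =====
def Claim_equal_solveSimulation : Prop := ∀ (r_list : List Int) (p_list : List Int) (n : Int), Dom_solveSimulation r_list p_list n → Pre_solveSimulation r_list p_list n → Spec_solveSimulation r_list p_list n (solveSimulation r_list p_list n)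

-- ===== LEMMAS AND PROOFS =====
theorem pv_getD_set (l : List Int) (i j : Nat) (v : Int) (hj : j < l.length) :
    (l.set j v).getD i 0 = if i = j then v else l.getD i 0 := by
  by_cases h : i = j
  · subst h; simp [List.getD_eq_getElem?_getD, List.getElem?_set_self hj]
  · rw [List.getD_eq_getElem?_getD, List.getElem?_set_ne (by omega : j ≠ i), if_neg h,
      List.getD_eq_getElem?_getD]
theorem pv_sum_take (f : Int → Nat) (r : List Int) (N : Nat) (hN : N ≤ r.length) :
    ((r.take N).map f).sum = ∑ j ∈ Finset.range N, f (r.getD j 0) := by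
  induction N with
  | zero => simp
  | succ m ih =>
    rw [List.take_succ, List.getElem?_eq_getElem (by omega : m < r.length)]
    simp only [List.map_append, List.sum_append, Finset.sum_range_succ, ih (by omega)]
    simp [List.getD_eq_getElem?_getD, List.getElem?_eq_getElem (by omega : m < r.length)]
theorem pv_getD_take (r : List Int) (N i : Nat) (h : i < N) (hN : N ≤ r.length) :
    r.getD i 0 = (r.take N)[i]'(by simp; omega) := by
  rw [List.getElem_take, List.getD_eq_getElem?_getD, List.getElem?_eq_getElem (by omega : i < r.length)]
  rfl

theorem pv_ceilA_le_iff (a b c : Int) (hb : 0 < b) :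
    PySem.Int.floordiv (a + b - 1) b ≤ c ↔ a ≤ c * b := by
  rw [show (PySem.Int.floordiv (a + b - 1) b ≤ c) ↔ (PySem.Int.floordiv (a + b - 1) b < c + 1) by omega,
    PySem.Int.floordiv_lt_iff_lt_mul hb, add_one_mul]
  omega

theorem pv_ceilB_le_iff (a b c : Int) (hb : 0 < b) :
    -(PySem.Int.floordiv (-a) b) ≤ c ↔ a ≤ c * b := by
  rw [neg_le, PySem.Int.le_floordiv_iff_mul_le hb]
  constructor <;> intro h <;> nlinarith [h]

theorem pvGcdW_eq_aux : ∀ (k : Nat) (x g : Int), x.natAbs ≤ k → 0 ≤ g → 0 ≤ x →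
    pvGcdW g x = (Nat.gcd x.natAbs g.natAbs : Int) := by
  intro k
  induction k with
  | zero =>
    intro x g hk hg hx
    have : x = 0 := by omega
    subst this; rw [pvGcdW]; simp [Int.natAbs_of_nonneg hg]
  | succ m ih =>
    intro x g hk hg hx
    by_cases h0 : x = 0
    · subst h0; rw [pvGcdW]; simp [Int.natAbs_of_nonneg hg]
    · have hxpos : 0 < x := lt_of_le_of_ne hx (Ne.symm h0)
      rw [pvGcdW, dif_neg h0]
      have hm := PySem.Int.mod_nonneg (a := g) (b := x) hxpos
      have hlt := PySem.Int.mod_lt (a := g) (b := x) hxpos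
      rw [ih (PySem.Int.mod g x) x (by omega) hx hm]
      have hmod : (PySem.Int.mod g x).natAbs = g.natAbs % x.natAbs := by
        rw [PySem.Int.mod_eq_emod_of_pos hxpos]
        have h1 : 0 ≤ g % x := Int.emod_nonneg g (by omega)
        have e1 := Int.natAbs_of_nonneg h1
        have e2 : ((g.natAbs % x.natAbs : Nat) : Int) = g % x := by
          push_cast
          rw [abs_of_nonneg hg, abs_of_nonneg hx]
        omega
      rw [hmod]
      conv_rhs => rw [Nat.gcd_rec]

theorem pvGcdW_eq (g x : Int) (hg : 0 ≤ g) (hx : 0 ≤ x) :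
    pvGcdW g x = (Nat.gcd x.natAbs g.natAbs : Int) :=
  pvGcdW_eq_aux x.natAbs x g le_rfl hg hx

theorem pv_foldl_gcdW_eq (l : List Int) (g0 : Int) (hg : 0 ≤ g0) (hl : ∀ x ∈ l, 0 ≤ x) :
    l.foldl (fun g x => pvGcdW g x) g0 = ((l.map Int.natAbs).foldl Nat.gcd g0.natAbs : Nat) := by
  induction l generalizing g0 with
  | nil => simp [Int.natAbs_of_nonneg hg]
  | cons a l ih =>
    simp only [List.foldl_cons, List.map_cons]
    rw [pvGcdW_eq g0 a hg (hl a (by simp)), ih _ (by positivity) (fun x hx => hl x (by simp [hx]))]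
    simp [Nat.gcd_comm]

theorem pv_foldl_gcd_dvd_start : ∀ (l : List Nat) (g0 : Nat), l.foldl Nat.gcd g0 ∣ g0 := by
  intro l
  induction l with
  | nil => simp
  | cons a l ih => intro g0; exact (ih (Nat.gcd g0 a)).trans (Nat.gcd_dvd_left _ _)

theorem pv_foldl_gcd_dvd_mem : ∀ (l : List Nat) (g0 : Nat) (x : Nat), x ∈ l → l.foldl Nat.gcd g0 ∣ x := by
  intro l
  induction l with
  | nil => simp
  | cons a l ih =>
    intro g0 x hx
    rcases List.mem_cons.1 hx with h | h
    · subst h; exact (pv_foldl_gcd_dvd_start l _).trans (Nat.gcd_dvd_right _ _)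
    · exact ih _ x h

theorem pv_foldl_gcd_greatest : ∀ (l : List Nat) (g0 c : Nat), c ∣ g0 → (∀ x ∈ l, c ∣ x) →
    c ∣ l.foldl Nat.gcd g0 := by
  intro l
  induction l with
  | nil => intro g0 c h _; simpa using h
  | cons a l ih =>
    intro g0 c h hl
    exact ih _ c (Nat.dvd_gcd h (hl a (by simp))) (fun x hx => hl x (by simp [hx]))

-- proof-side closed-form quantities
def pvD (r : List Int) (N : Nat) : Nat := ((r.take N).map Int.natAbs).foldl Nat.gcd 0
def pvS (r : List Int) (N : Nat) (i : Nat) : Int := PySem.Int.floordiv (r.getD i 0) (pvD r N)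
def pvPm (r p0 : List Int) (i : Nat) : Int :=
  if p0.getD i 0 > r.getD i 0 then p0.getD i 0 else r.getD i 0
def pvC (r p0 : List Int) (N : Nat) (i : Nat) : Int :=
  -(PySem.Int.floordiv (-(pvPm r p0 i)) (pvS r N i))
def pvT (r p0 : List Int) (N : Nat) : Int :=
  (List.range N).foldl (fun t i => if pvC r p0 N i > t then pvC r p0 N i else t) 0
def pvFix (r p0 : List Int) (N : Nat) (j : Nat) : Int := pvS r N j * pvT r p0 N
def pvOut (r p0 : List Int) (N : Nat) : List Int :=
  (List.range N).map (fun j => pvFix r p0 N j - p0.getD j 0)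

-- fold-max facts
theorem pv_foldmax_ge_start (c : Nat → Int) (l : List Nat) (t0 : Int) :
    t0 ≤ l.foldl (fun t i => if c i > t then c i else t) t0 := by
  induction l generalizing t0 with
  | nil => simp
  | cons a l ih =>
    simp only [List.foldl_cons]
    refine le_trans ?_ (ih _)
    split <;> omega
theorem pv_foldmax_ge (c : Nat → Int) (l : List Nat) (t0 : Int) (i : Nat) (hi : i ∈ l) :
    c i ≤ l.foldl (fun t i => if c i > t then c i else t) t0 := by
  induction l generalizing t0 with
  | nil => simp at hi
  | cons a l ih =>
    simp only [List.foldl_cons]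
    rcases List.mem_cons.1 hi with h | h
    · subst h
      refine le_trans ?_ (pv_foldmax_ge_start c l _)
      split <;> omega
    · exact ih _ h
theorem pv_foldmax_le (c : Nat → Int) (l : List Nat) (t0 : Int) (b : Int) (h0 : t0 ≤ b)
    (h : ∀ i ∈ l, c i ≤ b) : l.foldl (fun t i => if c i > t then c i else t) t0 ≤ b := by
  induction l generalizing t0 with
  | nil => simpa
  | cons a l ih =>
    simp only [List.foldl_cons]
    have ha := h a (by simp)
    refine ih _ ?_ (fun i hi => h i (by simp [hi]))
    split <;> omega

-- context facts (N = n.toNat, all first-N ratios positive)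
theorem pvD_dvd (r : List Int) (N : Nat) (hNr : N ≤ r.length) (i : Nat) (hi : i < N) :
    (pvD r N : Int) ∣ r.getD i 0 := by
  have hmem : (r.getD i 0).natAbs ∈ (r.take N).map Int.natAbs := by
    rw [pv_getD_take r N i hi hNr]
    exact List.mem_map_of_mem (List.getElem_mem _)
  have := pv_foldl_gcd_dvd_mem _ 0 _ hmem
  exact (Int.natCast_dvd_natCast.2 this).trans (Int.natAbs_dvd.2 dvd_rfl)
theorem pvD_pos (r : List Int) (N : Nat) (hNr : N ≤ r.length) (hN : 0 < N)
    (hpos : ∀ i < N, 0 < r.getD i 0) : 0 < pvD r N := by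
  rcases Nat.eq_zero_or_pos (pvD r N) with h | h
  · exfalso
    have := pvD_dvd r N hNr 0 hN
    rw [h] at this
    have h0 : r.getD 0 0 = 0 := Int.zero_dvd.1 (by exact_mod_cast this)
    have := hpos 0 hN
    omega
  · exact h
theorem pvS_mul (r : List Int) (N : Nat) (hNr : N ≤ r.length) (hN : 0 < N)
    (hpos : ∀ i < N, 0 < r.getD i 0) (i : Nat) (hi : i < N) :
    pvS r N i * (pvD r N : Int) = r.getD i 0 := by
  have hd := pvD_pos r N hNr hN hpos
  rw [pvS, PySem.Int.floordiv_eq_ediv_of_pos (by exact_mod_cast hd)]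
  exact Int.ediv_mul_cancel (pvD_dvd r N hNr i hi)
theorem pvS_pos (r : List Int) (N : Nat) (hNr : N ≤ r.length) (hN : 0 < N)
    (hpos : ∀ i < N, 0 < r.getD i 0) (i : Nat) (hi : i < N) : 0 < pvS r N i := by
  have h1 := pvS_mul r N hNr hN hpos i hi
  have h2 := pvD_pos r N hNr hN hpos
  have h3 := hpos i hi
  nlinarith [h1, h3, (by exact_mod_cast h2 : (0:Int) < (pvD r N : Int))]
theorem pvS_le (r : List Int) (N : Nat) (hNr : N ≤ r.length) (hN : 0 < N)
    (hpos : ∀ i < N, 0 < r.getD i 0) (i : Nat) (hi : i < N) : pvS r N i ≤ r.getD i 0 := by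
  have h1 := pvS_mul r N hNr hN hpos i hi
  have h2 : (1:Int) ≤ (pvD r N : Int) := by exact_mod_cast pvD_pos r N hNr hN hpos
  nlinarith [pvS_pos r N hNr hN hpos i hi]
theorem pvC_le_T (r p0 : List Int) (N : Nat) (i : Nat) (hi : i < N) :
    pvC r p0 N i ≤ pvT r p0 N :=
  pv_foldmax_ge _ _ 0 i (List.mem_range.2 hi)
theorem pvT_nonneg (r p0 : List Int) (N : Nat) : 0 ≤ pvT r p0 N :=
  pv_foldmax_ge_start _ _ 0
theorem pvT_le (r p0 : List Int) (N : Nat) (b : Int) (hb : 0 ≤ b)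
    (h : ∀ i < N, pvC r p0 N i ≤ b) : pvT r p0 N ≤ b :=
  pv_foldmax_le _ _ 0 b hb (fun i hi => h i (List.mem_range.1 hi))
theorem pvPm_le_fix (r p0 : List Int) (N : Nat) (hNr : N ≤ r.length) (hN : 0 < N)
    (hpos : ∀ i < N, 0 < r.getD i 0) (j : Nat) (hj : j < N) :
    pvPm r p0 j ≤ pvFix r p0 N j := by
  have hs := pvS_pos r N hNr hN hpos j hj
  have h1 := pvC_le_T r p0 N j hj
  rw [pvC, pv_ceilB_le_iff _ _ _ hs] at h1
  rw [pvFix]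
  nlinarith [h1]

-- invariant, return-accumulator link, and measure for A's while-loop
def pvInv (r p0 : List Int) (N : Nat) (p : List Int) : Prop :=
  p.length = p0.length ∧ ∀ j < N, pvPm r p0 j ≤ p.getD j 0 ∧ p.getD j 0 ≤ pvFix r p0 N j
def pvRetL (p0 : List Int) (N : Nat) (ret p : List Int) : Prop :=
  ret.length = N ∧ ∀ j < N, ret.getD j 0 = p.getD j 0 - p0.getD j 0
def pvMsr (r p0 : List Int) (N : Nat) (p : List Int) : Nat :=
  ∑ j ∈ Finset.range N, (pvFix r p0 N j - p.getD j 0).toNat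

def pvStepN (r : List Int) (st : List Int × List Int × Int) (ij : Nat × Nat) :
    List Int × List Int × Int :=
  let require := PySem.Int.floordiv
    (st.2.1.getD ij.1 0 * r.getD ij.2 0 + r.getD ij.1 0 - 1) (r.getD ij.1 0)
  if require > st.2.1.getD ij.2 0 then
    (st.1.set ij.2 (st.1.getD ij.2 0 + (require - st.2.1.getD ij.2 0)),
     st.2.1.set ij.2 require, 0)
  else st

theorem pv_msr_set (r p0 : List Int) (N : Nat) (p : List Int) (j : Nat) (hj : j < N)
    (hjl : j < p.length) (v : Int) :
    pvMsr r p0 N (p.set j v) + (pvFix r p0 N j - p.getD j 0).toNat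
      = pvMsr r p0 N p + (pvFix r p0 N j - v).toNat := by
  unfold pvMsr
  have hmem : j ∈ Finset.range N := Finset.mem_range.2 hj
  rw [← Finset.add_sum_erase _ _ hmem, ← Finset.add_sum_erase _ (fun k => (pvFix r p0 N k - p.getD k 0).toNat) hmem]
  have hsame : ∑ k ∈ (Finset.range N).erase j, (pvFix r p0 N k - (p.set j v).getD k 0).toNat
      = ∑ k ∈ (Finset.range N).erase j, (pvFix r p0 N k - p.getD k 0).toNat := by
    refine Finset.sum_congr rfl (fun k hk => ?_)
    rw [pv_getD_set p k j v hjl, if_neg (Finset.ne_of_mem_erase hk)]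
  rw [hsame, pv_getD_set p j j v hjl, if_pos rfl]
  omega

theorem pv_step (r p0 : List Int) (N : Nat) (hNr : N ≤ r.length) (hNp : N ≤ p0.length) (hN : 0 < N)
    (hpos : ∀ i < N, 0 < r.getD i 0)
    (i j : Nat) (hi : i < N) (hj : j < N) (ret p : List Int) (f : Int)
    (hI : pvInv r p0 N p) (hR : pvRetL p0 N ret p) :
    (pvStepN r (ret, p, f) (i, j) = (ret, p, f)
        ∧ p.getD i 0 * r.getD j 0 ≤ p.getD j 0 * r.getD i 0)
    ∨ ((pvStepN r (ret, p, f) (i, j)).2.2 = 0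
        ∧ pvInv r p0 N (pvStepN r (ret, p, f) (i, j)).2.1
        ∧ pvRetL p0 N (pvStepN r (ret, p, f) (i, j)).1 (pvStepN r (ret, p, f) (i, j)).2.1
        ∧ pvMsr r p0 N (pvStepN r (ret, p, f) (i, j)).2.1 < pvMsr r p0 N p) := by
  have hri := hpos i hi
  have hrj := hpos j hj
  set rq := PySem.Int.floordiv (p.getD i 0 * r.getD j 0 + r.getD i 0 - 1) (r.getD i 0) with hrq
  by_cases hc : rq > p.getD j 0
  · right
    have hstep : pvStepN r (ret, p, f) (i, j)
        = (ret.set j (ret.getD j 0 + (rq - p.getD j 0)), p.set j rq, 0) := by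
      rw [pvStepN]; simp only [← hrq]; rw [if_pos hc]
    -- rq ≤ pvFix j
    have hfixrel : pvFix r p0 N i * r.getD j 0 = pvFix r p0 N j * r.getD i 0 := by
      rw [pvFix, pvFix, ← pvS_mul r N hNr hN hpos i hi, ← pvS_mul r N hNr hN hpos j hj]
      ring
    have hub : rq ≤ pvFix r p0 N j := by
      rw [hrq, pv_ceilA_le_iff _ _ _ hri, ← hfixrel]
      have h1 : p.getD i 0 ≤ pvFix r p0 N i := (hI.2 i hi).2
      nlinarith [h1, hrj]
    have hjl : j < p.length := by
      have := hI.1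
      omega
    have hrl : j < ret.length := by
      have := hR.1
      omega
    refine ⟨by rw [hstep], ?_, ?_, ?_⟩
    · rw [hstep]
      refine ⟨by simpa using hI.1, fun k hk => ?_⟩
      rw [pv_getD_set p k j rq hjl]
      by_cases hkj : k = j
      · subst hkj
        rw [if_pos rfl]
        exact ⟨le_trans (hI.2 k hk).1 (by omega), hub⟩
      · rw [if_neg hkj]
        exact hI.2 k hk
    · rw [hstep]
      refine ⟨by simpa using hR.1, fun k hk => ?_⟩
      rw [pv_getD_set p k j rq hjl, pv_getD_set ret k j _ hrl]
      by_cases hkj : k = j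
      · subst hkj
        rw [if_pos rfl, if_pos rfl, hR.2 k hk]
        ring
      · rw [if_neg hkj, if_neg hkj]
        exact hR.2 k hk
    · rw [hstep]
      show pvMsr r p0 N (p.set j rq) < pvMsr r p0 N p
      have hmsr := pv_msr_set r p0 N p j hj hjl rq
      have h2 : (pvFix r p0 N j - rq).toNat < (pvFix r p0 N j - p.getD j 0).toNat := by
        omega
      omega
  · left
    constructor
    · rw [pvStepN]; simp only [← hrq]; rw [if_neg hc]
    · have : rq ≤ p.getD j 0 := by omega
      rw [hrq, pv_ceilA_le_iff _ _ _ hri] at this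
      exact this

theorem pv_fold (r p0 : List Int) (N : Nat) (hNr : N ≤ r.length) (hNp : N ≤ p0.length)
    (hN : 0 < N) (hpos : ∀ i < N, 0 < r.getD i 0) :
    ∀ (L : List (Nat × Nat)), (∀ ij ∈ L, ij.1 < N ∧ ij.2 < N) →
    ∀ (ret p : List Int) (f : Int), pvInv r p0 N p → pvRetL p0 N ret p →
    pvInv r p0 N (L.foldl (pvStepN r) (ret, p, f)).2.1
    ∧ pvRetL p0 N (L.foldl (pvStepN r) (ret, p, f)).1 (L.foldl (pvStepN r) (ret, p, f)).2.1
    ∧ pvMsr r p0 N (L.foldl (pvStepN r) (ret, p, f)).2.1 ≤ pvMsr r p0 N p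
    ∧ ((L.foldl (pvStepN r) (ret, p, f)).2.2 = f ∨ (L.foldl (pvStepN r) (ret, p, f)).2.2 = 0)
    ∧ ((L.foldl (pvStepN r) (ret, p, f)).2.2 ≠ f
        → pvMsr r p0 N (L.foldl (pvStepN r) (ret, p, f)).2.1 < pvMsr r p0 N p)
    ∧ ((L.foldl (pvStepN r) (ret, p, f)).2.2 ≠ 0 → f ≠ 0
        → L.foldl (pvStepN r) (ret, p, f) = (ret, p, f)
          ∧ ∀ ij ∈ L, p.getD ij.1 0 * r.getD ij.2 0 ≤ p.getD ij.2 0 * r.getD ij.1 0) := by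
  intro L
  induction L with
  | nil =>
    intro _ ret p f hI hR
    exact ⟨hI, hR, le_rfl, Or.inl rfl, fun h => absurd rfl h,
      fun _ _ => ⟨rfl, by intro ij h; cases h⟩⟩
  | cons ij L ih =>
    intro hLin ret p f hI hR
    obtain ⟨i, j⟩ := ij
    have hin := hLin (i, j) (by simp)
    have hLin' : ∀ ij ∈ L, ij.1 < N ∧ ij.2 < N := fun ij h => hLin ij (by simp [h])
    rcases pv_step r p0 N hNr hNp hN hpos i j hin.1 hin.2 ret p f hI hR with
      ⟨heq, hcond⟩ | ⟨hf0, hI', hR', hlt⟩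
    · simp only [List.foldl_cons, heq]
      obtain ⟨c1, c2, c3, c4, c5, c6⟩ := ih hLin' ret p f hI hR
      refine ⟨c1, c2, c3, c4, c5, fun h1 h2 => ?_⟩
      obtain ⟨he, hall⟩ := c6 h1 h2
      refine ⟨he, fun ij hij => ?_⟩
      rcases List.mem_cons.1 hij with h | h
      · rw [h]; exact hcond
      · exact hall ij h
    · rcases hσ : pvStepN r (ret, p, f) (i, j) with ⟨ret1, p1, f1⟩
      rw [hσ] at hf0 hI' hR' hlt
      simp only at hf0 hI' hR' hlt
      subst hf0
      simp only [List.foldl_cons, hσ]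
      obtain ⟨c1, c2, c3, c4, c5, c6⟩ := ih hLin' ret1 p1 0 hI' hR'
      have hzero : (L.foldl (pvStepN r) (ret1, p1, 0)).2.2 = 0 := by
        rcases c4 with h | h <;> exact h
      exact ⟨c1, c2, le_trans c3 (le_of_lt hlt), Or.inr hzero,
        fun _ => lt_of_le_of_lt c3 hlt, fun h _ => absurd hzero h⟩

theorem pv_fixpt (r p0 : List Int) (N : Nat) (hNr : N ≤ r.length) (hN : 0 < N)
    (hpos : ∀ i < N, 0 < r.getD i 0) (p : List Int) (hI : pvInv r p0 N p)
    (hfp : ∀ i < N, ∀ j < N, p.getD i 0 * r.getD j 0 ≤ p.getD j 0 * r.getD i 0) :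
    ∀ j < N, p.getD j 0 = pvFix r p0 N j := by
  have hDpos : (0:Int) < (pvD r N : Int) := by exact_mod_cast pvD_pos r N hNr hN hpos
  have heq : ∀ i < N, ∀ j < N, p.getD i 0 * r.getD j 0 = p.getD j 0 * r.getD i 0 :=
    fun i hi j hj => le_antisymm (hfp i hi j hj) (by linarith [hfp j hj i hi])
  have hs : ∀ i < N, ∀ j < N, p.getD i 0 * pvS r N j = p.getD j 0 * pvS r N i := by
    intro i hi j hj
    have h1 := heq i hi j hj
    rw [← pvS_mul r N hNr hN hpos i hi, ← pvS_mul r N hNr hN hpos j hj] at h1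
    have h2 : (p.getD i 0 * pvS r N j) * (pvD r N : Int)
        = (p.getD j 0 * pvS r N i) * (pvD r N : Int) := by linarith [h1]
    exact mul_right_cancel₀ (by omega) h2
  have hp_pos : ∀ i < N, 0 < p.getD i 0 := by
    intro i hi
    have h1 := (hI.2 i hi).1
    have h2 := hpos i hi
    rw [pvPm] at h1
    split_ifs at h1 <;> omega
  -- s_0 divides p_0 (via gcd over the reduced ratios being 1)
  have hs0 : 0 < pvS r N 0 := pvS_pos r N hNr hN hpos 0 hN
  have hdvd0 : pvS r N 0 ∣ p.getD 0 0 := by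
    have claim1 : ∀ m, m ≤ N → pvS r N 0 ∣ p.getD 0 0 *
        (((List.range m).foldl (fun a i => Nat.gcd a (pvS r N i).natAbs) 0 : Nat) : Int) := by
      intro m
      induction m with
      | zero => simp
      | succ k ihk =>
        intro hk
        rw [List.range_succ, List.foldl_append, List.foldl_cons, List.foldl_nil]
        have h1 := ihk (by omega)
        have h2 : pvS r N 0 ∣ p.getD 0 0 * pvS r N k := by
          refine ⟨p.getD k 0, ?_⟩
          rw [hs 0 hN k (by omega)]
          ring
        have h3 := Int.dvd_coe_gcd h1 h2
        rw [Int.gcd_mul_left] at h3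
        have hcast : ((Nat.gcd ((List.range k).foldl (fun a i => Nat.gcd a (pvS r N i).natAbs) 0)
            (pvS r N k).natAbs : Nat) : Int)
            = (Int.gcd (((List.range k).foldl (fun a i => Nat.gcd a (pvS r N i).natAbs) 0 : Nat) : Int) (pvS r N k) : Nat) := by
          simp [Int.gcd]
        rw [hcast]
        have hp0 : (0:Int) ≤ p.getD 0 0 := le_of_lt (hp_pos 0 hN)
        calc pvS r N 0 ∣ (p.getD 0 0).natAbs * (Int.gcd _ (pvS r N k) : Nat) := h3
          _ = p.getD 0 0 * (Int.gcd _ (pvS r N k) : Nat) := by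
              push_cast
              rw [abs_of_nonneg hp0]
    have claim2 : ((List.range N).foldl (fun a i => Nat.gcd a (pvS r N i).natAbs) 0) = 1 := by
      have hE : ∀ i < N, ((List.range N).foldl (fun a i => Nat.gcd a (pvS r N i).natAbs) 0)
          ∣ (pvS r N i).natAbs := by
        intro i hi
        have : ((List.range N).foldl (fun a i => Nat.gcd a (pvS r N i).natAbs) 0)
            = (((List.range N).map (fun i => (pvS r N i).natAbs)).foldl Nat.gcd 0) := by
          rw [List.foldl_map]
        rw [this]
        exact pv_foldl_gcd_dvd_mem _ _ _ (List.mem_map_of_mem (List.mem_range.2 hi))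
      set E := (List.range N).foldl (fun a i => Nat.gcd a (pvS r N i).natAbs) 0 with hEdef
      have hDE : pvD r N * E ∣ pvD r N := by
        refine pv_foldl_gcd_greatest _ _ _ (dvd_zero _) ?_
        intro x hx
        obtain ⟨y, hy, rfl⟩ := List.mem_map.1 hx
        obtain ⟨i, hilen, rfl⟩ := List.mem_iff_getElem.1 hy
        have hiN : i < N := by
          have := List.length_take_le N r
          have : (r.take N).length = N := List.length_take_of_le hNr
          omega
        have hgi : (r.take N)[i] = r.getD i 0 := (pv_getD_take r N i hiN hNr).symm
        rw [hgi]
        have h1 := pvS_mul r N hNr hN hpos i hiN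
        have h2 : (pvS r N i).natAbs * pvD r N = (r.getD i 0).natAbs := by
          have := congrArg Int.natAbs h1
          simpa [Int.natAbs_mul] using this
        rw [← h2]
        obtain ⟨k, hk⟩ := hE i hiN
        exact ⟨k, by rw [hk]; ring⟩
      have hDpos' : 0 < pvD r N := pvD_pos r N hNr hN hpos
      rcases hDE with ⟨c, hc⟩
      have h1 : pvD r N * (E * c) = pvD r N * 1 := by rw [← mul_assoc, ← hc, mul_one]
      exact Nat.eq_one_of_mul_eq_one_right (Nat.eq_of_mul_eq_mul_left hDpos' h1)
    have := claim1 N le_rfl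
    rw [claim2] at this
    simpa using this
  obtain ⟨c, hc⟩ := hdvd0
  have hpj : ∀ j < N, p.getD j 0 = c * pvS r N j := by
    intro j hj
    have h1 := hs 0 hN j hj
    rw [hc] at h1
    have h2 : (c * pvS r N j) * pvS r N 0 = p.getD j 0 * pvS r N 0 := by ring_nf; ring_nf at h1; linarith [h1]
    exact (mul_right_cancel₀ (by omega) h2).symm
  have hc_pos : 0 < c := by
    have h1 := hp_pos 0 hN
    rw [hc] at h1
    nlinarith [hs0]
  have hc_ge : pvT r p0 N ≤ c := by
    refine pvT_le r p0 N c (by omega) (fun i hi => ?_)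
    rw [pvC, pv_ceilB_le_iff _ _ _ (pvS_pos r N hNr hN hpos i hi)]
    have h1 := (hI.2 i hi).1
    rw [hpj i hi] at h1
    linarith [h1]
  have hc_le : c ≤ pvT r p0 N := by
    have h1 := (hI.2 0 hN).2
    rw [hpj 0 hN, pvFix] at h1
    have := hs0
    nlinarith [h1]
  intro j hj
  rw [hpj j hj, pvFix]
  have : c = pvT r p0 N := le_antisymm hc_le hc_ge
  rw [this]; ring

theorem pv_getD_eq_getElem (l : List Int) (j : Nat) (h : j < l.length) : l.getD j 0 = l[j] := by
  rw [List.getD_eq_getElem?_getD, List.getElem?_eq_getElem h]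
  rfl

def pvStepI (r : List Int) (st : List Int × List Int) (i : Nat) : List Int × List Int :=
  (st.1.set i (max (r.getD i 0 - st.2.getD i 0) 0),
   st.2.set i (st.2.getD i 0 + max (r.getD i 0 - st.2.getD i 0) 0))

theorem pv_init_eq (r p0 : List Int) (n : Int) (hn : 0 ≤ n) :
    pvInitA r p0 n = (List.range n.toNat).foldl (pvStepI r) (List.replicate n.toNat 0, p0) := by
  rw [pvInitA, PySem.List.pyRange_one]
  simp only [sub_zero, List.foldl_map, zero_add, PySem.List.pyGetD_natCast,
    PySem.List.pySetD_natCast]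
  rfl

theorem pv_pass_eq (r : List Int) (n : Int) (hn : 0 ≤ n) (st : List Int × List Int × Int) :
    pvPassA r n st = ((List.range n.toNat).flatMap
      (fun i => (List.range n.toNat).map (fun j => (i, j)))).foldl (pvStepN r) st := by
  rw [pvPassA, PySem.List.pyRange_one, List.foldl_flatMap]
  simp only [sub_zero, List.foldl_map, zero_add, PySem.List.pyGetD_natCast,
    PySem.List.pySetD_natCast]
  rfl

theorem pv_init_spec (r p0 : List Int) (N : Nat) (hNp : N ≤ p0.length) :
    ∀ m, m ≤ N →
    ((List.range m).foldl (pvStepI r) (List.replicate N 0, p0)).1.length = N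
    ∧ ((List.range m).foldl (pvStepI r) (List.replicate N 0, p0)).2.length = p0.length
    ∧ (∀ j, ((List.range m).foldl (pvStepI r) (List.replicate N 0, p0)).2.getD j 0
        = if j < m then pvPm r p0 j else p0.getD j 0)
    ∧ (∀ j, ((List.range m).foldl (pvStepI r) (List.replicate N 0, p0)).1.getD j 0
        = if j < m then pvPm r p0 j - p0.getD j 0 else 0) := by
  intro m
  induction m with
  | zero =>
    intro _
    refine ⟨by simp, by simp, fun j => by simp, fun j => ?_⟩
    simp only [List.range_zero, List.foldl_nil]
    rw [if_neg (by omega)]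
    rcases Nat.lt_or_ge j N with h | h
    · rw [List.getD_eq_getElem?_getD, List.getElem?_eq_getElem (by simpa using h)]
      simp
    · rw [List.getD_eq_getElem?_getD, List.getElem?_eq_none (by simpa using h)]
      rfl
  | succ m ih =>
    intro hm
    obtain ⟨h1, h2, h3, h4⟩ := ih (by omega)
    rw [List.range_succ, List.foldl_append, List.foldl_cons, List.foldl_nil]
    set st := (List.range m).foldl (pvStepI r) (List.replicate N 0, p0) with hst
    have hmN : m < N := by omega
    have hml1 : m < st.1.length := by omega
    have hml2 : m < st.2.length := by omega
    have hv : st.2.getD m 0 = p0.getD m 0 := by rw [h3 m, if_neg (by omega)]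
    refine ⟨by simp [pvStepI, h1], by simp [pvStepI, h2], fun j => ?_, fun j => ?_⟩
    · show (st.2.set m _).getD j 0 = _
      rw [pv_getD_set _ j m _ hml2, hv]
      by_cases hjm : j = m
      · subst hjm
        rw [if_pos rfl, if_pos (by omega), pvPm]
        split_ifs <;> omega
      · rw [if_neg hjm, h3 j]
        by_cases hj : j < m
        · rw [if_pos hj, if_pos (by omega)]
        · rw [if_neg hj, if_neg (by omega)]
    · show (st.1.set m _).getD j 0 = _
      rw [pv_getD_set _ j m _ hml1, hv]
      by_cases hjm : j = m
      · subst hjm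
        rw [if_pos rfl, if_pos (by omega), pvPm]
        split_ifs <;> omega
      · rw [if_neg hjm, h4 j]
        by_cases hj : j < m
        · rw [if_pos hj, if_pos (by omega)]
        · rw [if_neg hj, if_neg (by omega)]

theorem pv_pairs_mem (N : Nat) :
    ∀ ij ∈ (List.range N).flatMap (fun i => (List.range N).map (fun j => (i, j))),
      ij.1 < N ∧ ij.2 < N := by
  intro ij hij
  simp only [List.mem_flatMap, List.mem_map, List.mem_range] at hij
  obtain ⟨i, hi, j, hj, rfl⟩ := hij
  exact ⟨hi, hj⟩

theorem pv_pairs_complete (N : Nat) (i j : Nat) (hi : i < N) (hj : j < N) :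
    (i, j) ∈ (List.range N).flatMap (fun i => (List.range N).map (fun j => (i, j))) := by
  simp only [List.mem_flatMap, List.mem_map, List.mem_range]
  exact ⟨i, hi, j, hj, rfl⟩

theorem pv_loop (r p0 : List Int) (n : Int) (N : Nat) (hn : n.toNat = N) (h0 : 0 ≤ n)
    (hNr : N ≤ r.length) (hNp : N ≤ p0.length) (hN : 0 < N)
    (hpos : ∀ i < N, 0 < r.getD i 0) :
    ∀ (fuel : Nat) (ret p : List Int), pvInv r p0 N p → pvRetL p0 N ret p →
    pvMsr r p0 N p < fuel → pvLoopA r n fuel (ret, p) = pvOut r p0 N := by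
  intro fuel
  induction fuel with
  | zero => intro ret p _ _ h; omega
  | succ fuel ih =>
    intro ret p hI hR hfuel
    rw [pvLoopA]
    simp only
    rw [pv_pass_eq r n h0, hn]
    set L := (List.range N).flatMap (fun i => (List.range N).map (fun j => (i, j))) with hL
    obtain ⟨c1, c2, c3, c4, c5, c6⟩ :=
      pv_fold r p0 N hNr hNp hN hpos L (pv_pairs_mem N) ret p 1 hI hR
    by_cases hflag : (L.foldl (pvStepN r) (ret, p, 1)).2.2 ≠ 0
    · rw [if_pos hflag]
      obtain ⟨heq, hcond⟩ := c6 hflag one_ne_zero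
      have hfp : ∀ i < N, ∀ j < N, p.getD i 0 * r.getD j 0 ≤ p.getD j 0 * r.getD i 0 :=
        fun i hi j hj => hcond (i, j) (pv_pairs_complete N i j hi hj)
      have hfix := pv_fixpt r p0 N hNr hN hpos p hI hfp
      rw [heq]
      show ret = pvOut r p0 N
      have hlen : ret.length = N := hR.1
      apply List.ext_getElem (by simp [pvOut, hlen])
      intro j hj1 hj2
      have hjN : j < N := by omega
      rw [← pv_getD_eq_getElem ret j hj1, hR.2 j hjN, hfix j hjN]
      simp [pvOut, hjN]
    · rw [if_neg hflag]
      push_neg at hflag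
      have hlt := c5 (by rw [hflag]; exact zero_ne_one)
      exact ih _ _ c1 c2 (by omega)

theorem pv_elem_le_sum (l : List Int) (N i : Nat) (hi : i < N) (hN : N ≤ l.length) :
    (l.getD i 0).natAbs ≤ ((l.take N).map Int.natAbs).sum := by
  refine List.le_sum_of_mem ?_
  rw [pv_getD_take l N i hi hN]
  exact List.mem_map_of_mem (List.getElem_mem _)

theorem pv_fuel_ok (r p0 : List Int) (n : Int) (N : Nat) (hn : n.toNat = N)
    (hNr : N ≤ r.length) (hNp : N ≤ p0.length) (hN : 0 < N)
    (hpos : ∀ i < N, 0 < r.getD i 0)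
    (p1 : List Int) (hp1 : ∀ j < N, p1.getD j 0 = pvPm r p0 j) :
    pvMsr r p0 N p1 < pvFuelA r p0 n := by
  set Sr := ((r.take N).map Int.natAbs).sum with hSr
  set Sp := ((p0.take N).map Int.natAbs).sum with hSp
  have hfuel : pvFuelA r p0 n = Sr * (Sp + Sr) + 1 := by
    rw [hSr, hSp]; simp only [pvFuelA, hn]
  have hT : pvT r p0 N ≤ ((Sp + Sr : Nat) : Int) := by
    refine pvT_le r p0 N _ (by positivity) (fun i hi => ?_)
    rw [pvC, pv_ceilB_le_iff _ _ _ (pvS_pos r N hNr hN hpos i hi)]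
    have h1 : pvPm r p0 i ≤ ((Sp + Sr : Nat) : Int) := by
      have e1 := pv_elem_le_sum p0 N i hi hNp
      have e2 := pv_elem_le_sum r N i hi hNr
      rw [pvPm]
      split_ifs <;> [skip; skip] <;> push_cast <;> omega
    refine le_trans h1 ?_
    exact le_mul_of_one_le_right (by positivity) (pvS_pos r N hNr hN hpos i hi)
  have hterm : ∀ j < N, (pvFix r p0 N j - p1.getD j 0).toNat ≤ (r.getD j 0).natAbs * (Sp + Sr) := by
    intro j hj
    have h1 : pvFix r p0 N j ≤ r.getD j 0 * ((Sp + Sr : Nat) : Int) := by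
      rw [pvFix]
      have hs1 := pvS_pos r N hNr hN hpos j hj
      have hs2 := pvS_le r N hNr hN hpos j hj
      have ht0 := pvT_nonneg r p0 N
      nlinarith [hT]
    have h2 : (r.getD j 0 * ((Sp + Sr : Nat) : Int)).toNat = (r.getD j 0).natAbs * (Sp + Sr) := by
      have hr := hpos j hj
      rw [Int.toNat_mul (by omega) (by positivity), Int.toNat_natCast]
      congr 1
      omega
    have hpm : 0 ≤ p1.getD j 0 := by
      have hr := hpos j hj
      rw [hp1 j hj, pvPm]
      split_ifs <;> omega
    omega
  have hsum : pvMsr r p0 N p1 ≤ ∑ j ∈ Finset.range N, (r.getD j 0).natAbs * (Sp + Sr) := by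
    refine Finset.sum_le_sum (fun j hj => hterm j (Finset.mem_range.1 hj))
  rw [← Finset.sum_mul, ← pv_sum_take Int.natAbs r N hNr, ← hSr] at hsum
  rw [hfuel]
  omega

theorem pv_alt_eq (r p0 : List Int) (n : Int) (hn : ¬ n ≤ 0)
    (hl : ∀ x ∈ r.take n.toNat, 0 ≤ x) :
    solveSimulation_alt r p0 n = pvOut r p0 n.toNat := by
  rw [solveSimulation_alt, if_neg hn]
  have hslice : PySem.List.slice r none (some n) = r.take n.toNat :=
    PySem.List.slice_to r (by omega)
  have hg : (PySem.List.slice r none (some n)).foldl (fun g x => pvGcdW g x) 0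
      = ((pvD r n.toNat : Nat) : Int) := by
    rw [hslice, pv_foldl_gcdW_eq _ 0 le_rfl hl, pvD]
    norm_num
  rw [hg, PySem.List.pyRange_one]
  simp only [sub_zero, List.foldl_map, List.map_map, zero_add, PySem.List.pyGetD_natCast]
  rw [pvOut]
  congr 1
  funext k
  simp only [Function.comp_apply, PySem.List.pyGetD_natCast, pvFix, pvS, pvT, pvC, pvPm]

theorem pv_main_eq (r p0 : List Int) (n : Int)
    (h1 : n.toNat ≤ r.length) (h2 : n.toNat ≤ p0.length)
    (h3 : ∀ x ∈ r.take n.toNat, 0 < x) :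
    solveSimulation r p0 n = solveSimulation_alt r p0 n := by
  by_cases hn : n ≤ 0
  · have hN0 : n.toNat = 0 := by omega
    rw [solveSimulation, solveSimulation_alt, if_pos hn]
    have hinit : pvInitA r p0 n = ([], p0) := by
      rw [pvInitA, PySem.List.pyRange_one_eq_nil hn, hN0]
      rfl
    have hpass : ∀ st, pvPassA r n st = st := by
      intro st
      rw [pvPassA, PySem.List.pyRange_one_eq_nil hn]
      rfl
    rcases hf : pvFuelA r p0 n with _ | k
    · exfalso
      rw [pvFuelA] at hf
      omega
    · rw [pvLoopA, hinit, hpass]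
      simp
  · push_neg at hn
    have hN : 0 < n.toNat := by omega
    have hpos : ∀ i < n.toNat, 0 < r.getD i 0 := by
      intro i hi
      rw [pv_getD_take r n.toNat i hi h1]
      exact h3 _ (List.getElem_mem _)
    rw [solveSimulation, pv_init_eq r p0 n (by omega)]
    obtain ⟨i1, i2, i3, i4⟩ := pv_init_spec r p0 n.toNat h2 n.toNat le_rfl
    set st := (List.range n.toNat).foldl (pvStepI r) (List.replicate n.toNat 0, p0) with hst
    have hI : pvInv r p0 n.toNat st.2 := by
      refine ⟨i2, fun j hj => ?_⟩
      rw [i3 j, if_pos hj]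
      exact ⟨le_rfl, pvPm_le_fix r p0 n.toNat h1 hN hpos j hj⟩
    have hR : pvRetL p0 n.toNat st.1 st.2 := by
      refine ⟨i1, fun j hj => ?_⟩
      rw [i4 j, if_pos hj, i3 j, if_pos hj]
    have hfuel := pv_fuel_ok r p0 n n.toNat rfl h1 h2 hN hpos st.2
      (fun j hj => by rw [i3 j, if_pos hj])
    rw [pv_loop r p0 n n.toNat rfl (by omega) h1 h2 hN hpos (pvFuelA r p0 n) st.1 st.2 hI hR hfuel,
      pv_alt_eq r p0 n (by omega) (fun x hx => le_of_lt (h3 x hx))]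


-- ===== VERDICT (by name: the statement is the Claim_ definition above) =====
theorem solveSimulation_spec : Claim_equal_solveSimulation := by
  intro r_list p_list n _ hPre
  exact pv_main_eq r_list p_list n hPre.1 hPre.2.1 hPre.2.2
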